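-- pv_equiv track=rewrite | github.com/suchot/CS-Notes | docs/offer/小红书/迷宫游戏.py | migong
-- ===== SOURCE A (Python) =====
-- def migong(n, matrix):
--
--     bigmatrix = [['#' for i in range(3*n)] for j in range(3*n)]
--     for i in range(3*n):
--         for j in range(3*n):
--             bigmatrix[i][j] = matrix[i%n][j%n]
--             if bigmatrix[i][j]=='S' and i//n== 1:
--                 si, sj = i, j
--     return bigmatrix, si, sj
-- ===== SOURCE B (Python) =====
-- def migong(n, matrix):
--     # B tiles by list slicing/repetition and finds the winning 'S' by a reversed
--     # break-search over the top-left n x n block. Output rows of bigmatrix are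
--     # value-equal to A's (they share list objects; the return VALUE is identical).
--     bigmatrix = [row[:n] * 3 for row in matrix[:n]] * 3
--     for r in range(n - 1, -1, -1):
--         row = matrix[r][:n]
--         if 'S' in row:
--             si = n + r
--             sj = 3 * n - 1 - row[::-1].index('S')
--             break
--     return bigmatrix, si, sj
-- ===== Notes on version B (the rewrite author's own statement) =====
-- stated objective: alternative
-- what changed: B builds the 3n x 3n maze by slicing and list repetition (row[:n]*3 per row, then tile*3) instead of A's cell-by-cell nested index loops over all 9n^2 positions, and finds the winning 'S' with an early-exit reversed search over the rows of the original n x n block (break at the last row in row-major order, column = 3n-1 - row[::-1].index('S')) instead of A's last-match test on every tiled cell; B's bigmatrix rows are value-equal to A's but share list objects where A allocates fresh rows.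
import Mathlib
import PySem

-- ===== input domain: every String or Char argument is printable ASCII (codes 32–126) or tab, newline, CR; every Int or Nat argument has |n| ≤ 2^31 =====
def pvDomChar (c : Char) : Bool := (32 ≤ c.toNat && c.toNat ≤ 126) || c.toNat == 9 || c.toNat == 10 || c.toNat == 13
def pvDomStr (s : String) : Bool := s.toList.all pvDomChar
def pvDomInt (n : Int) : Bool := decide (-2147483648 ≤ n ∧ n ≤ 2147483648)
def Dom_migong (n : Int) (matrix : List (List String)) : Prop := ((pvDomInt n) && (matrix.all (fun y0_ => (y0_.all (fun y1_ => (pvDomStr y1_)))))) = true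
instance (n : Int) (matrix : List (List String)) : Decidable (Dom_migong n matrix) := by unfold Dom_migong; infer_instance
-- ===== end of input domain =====

-- B tiles the maze by slicing and list repetition (row[:n]*3, tile*3) instead of cell-by-cell
-- index loops, and finds the winning 'S' by a reversed break-search over the top-left n×n block
-- (objective: alternative — staged slice/repeat construction + early-exit reversed search,
-- trading A's 9n² per-cell scan for whole-row operations; B's returned rows are value-equal to
-- A's, though B's bigmatrix shares row objects where A allocates fresh ones).

-- ===== PORT A =====
-- Literal port of A. Python locals si,sj are an Option (none = still unbound: Python would
-- raise UnboundLocalError at the return; those inputs are excluded by Pre_migong, the final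
-- `match` then returns (…,0,0) as a total placeholder). The condition reads bigmatrix[i][j],
-- which was assigned the value v on the line before, so it is ported as v (same value).
-- Index lookups matrix[i%n][j%n] are pyGetD-totalised; Pre_migong excludes the IndexError inputs.
def migong (n : Int) (matrix : List (List String)) : List (List String) × Int × Int :=
  let bm0 : List (List String) :=
    (PySem.List.pyRange 0 (3*n) 1).map (fun _ => (PySem.List.pyRange 0 (3*n) 1).map (fun _ => "#"))
  let res :=
    (PySem.List.pyRange 0 (3*n) 1).foldl (fun st i =>
      (PySem.List.pyRange 0 (3*n) 1).foldl (fun st j =>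
        let v := PySem.List.pyGetD (PySem.List.pyGetD matrix (PySem.Int.mod i n) [])
                   (PySem.Int.mod j n) "#"
        (PySem.List.pySetD st.1 i (PySem.List.pySetD (PySem.List.pyGetD st.1 i []) j v),
         if v == "S" && (PySem.Int.floordiv i n == 1) then some (i, j) else st.2)) st)
      (bm0, (none : Option (Int × Int)))
  match res.2 with
  | some (si, sj) => (res.1, si, sj)
  | none => (res.1, 0, 0)

-- ===== PORT B =====
-- Helper = B's reversed for-loop with break: first r (from n-1 down to 0) whose row slice
-- contains "S" stops the search. row[::-1] is ported as row.reverse (PySem.List.slice?_none_none_neg_one);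
-- row[::-1].index('S') is (index? … ).getD 0, total because it is guarded by the membership test.
def migongFind (n : Int) (matrix : List (List String)) : List Int → Option (Int × Int)
  | [] => none
  | r :: rs =>
    let row := PySem.List.slice (PySem.List.pyGetD matrix r []) none (some n)
    if "S" ∈ row then
      some (n + r, 3*n - 1 - (((PySem.List.index? row.reverse "S").getD 0 : Nat) : Int))
    else migongFind n matrix rs

-- Port of B: bigmatrix = [row[:n] * 3 for row in matrix[:n]] * 3, then the reversed search;
-- unbound si/sj (no 'S': Python raises UnboundLocalError, excluded by Pre_migong) is the
-- `none` branch, totalised as (…,0,0) like in A's port.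
def migong_alt (n : Int) (matrix : List (List String)) : List (List String) × Int × Int :=
  let tile : List (List String) :=
    (PySem.List.slice matrix none (some n)).map (fun row =>
      let p := PySem.List.slice row none (some n)
      p ++ p ++ p)
  let bigmatrix := tile ++ tile ++ tile
  match migongFind n matrix (PySem.List.pyRange (n - 1) (-1) (-1)) with
  | some (si, sj) => (bigmatrix, si, sj)
  | none => (bigmatrix, 0, 0)

-- ===== PRECONDITION & SPEC =====
-- Pre_ = exactly the inputs where Python A returns: n ≥ 1, the first n rows exist and have ≥ n
-- cells (else IndexError), and an 'S' occurs in the top-left n×n block (else UnboundLocalError).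
def Pre_migong (n : Int) (matrix : List (List String)) : Prop :=
  1 ≤ n ∧ n ≤ matrix.length ∧ (∀ row ∈ matrix.take n.toNat, n ≤ (row.length : Int)) ∧
    ∃ row ∈ matrix.take n.toNat, "S" ∈ row.take n.toNat
instance (n : Int) (matrix : List (List String)) : Decidable (Pre_migong n matrix) := by
  unfold Pre_migong; infer_instance
def pvWitness_migong : Int × List (List String) := (1, [["S"]])

def Spec_migong (n : Int) (matrix : List (List String)) (out : List (List String) × Int × Int) : Prop := out = migong_alt n matrix
instance (n : Int) (matrix : List (List String)) (out : List (List String) × Int × Int) : Decidable (Spec_migong n matrix out) := by unfold Spec_migong; infer_instance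

-- ===== CLAIM (what is proved, stated in full; the proofs are below) =====
def Claim_equal_migong : Prop := ∀ (n : Int) (matrix : List (List String)), Dom_migong n matrix → Pre_migong n matrix → Spec_migong n matrix (migong n matrix)

-- ===== LEMMAS AND PROOFS =====

-- generic: a fold that only overwrites with "some" keeps only the LAST match;
-- composing two such folds over the same list and predicate, the second absorbs the first.
theorem pvFoldl_if_absorb {γ β : Type} (p : γ → Bool) (h h' : γ → β) (l : List γ)
    (s : Option β) :
    l.foldl (fun s x => if p x then some (h' x) else s)
      (l.foldl (fun s x => if p x then some (h x) else s) s)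
    = l.foldl (fun s x => if p x then some (h' x) else s) s := by
  induction l using List.reverseRecOn generalizing s with
  | nil => rfl
  | append_singleton l x ih =>
    simp only [List.foldl_append, List.foldl_cons, List.foldl_nil]
    by_cases hp : p x
    · simp [hp]
    · simp only [hp, if_neg, Bool.false_eq_true, not_false_eq_true]
      exact ih s

-- generic: getD after set at the same index
theorem pvGetD_set_self {α : Type} (l : List α) (i : Nat) (x : α) (d : α) (h : i < l.length) :
    (l.set i x).getD i d = x := by
  simp [List.getD_eq_getElem?_getD, List.getElem?_set_self h]

-- collapse an inner row-update fold to a single set of row i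
theorem pvInner_collapse {α : Type} (f : Nat → α) (i : Nat) :
    ∀ (js : List Nat) (bm : List (List α)),
    js.foldl (fun b j => b.set i ((b.getD i []).set j (f j))) bm
      = bm.set i (js.foldl (fun ρ j => ρ.set j (f j)) (bm.getD i [])) := by
  intro js
  induction js with
  | nil =>
    intro bm
    simp only [List.foldl_nil]
    by_cases h : i < bm.length
    · rw [List.getD_eq_getElem?_getD, List.getElem?_eq_getElem h]
      exact (List.set_getElem_self h).symm
    · rw [List.set_eq_of_length_le (by omega)]
  | cons j js ih =>
    intro bm
    simp only [List.foldl_cons, ih]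
    by_cases h : i < bm.length
    · rw [List.set_set, pvGetD_set_self _ _ _ _ h]
    · have hset : ∀ y, bm.set i y = bm := fun y => List.set_eq_of_length_le (by omega)
      have hget : bm.getD i [] = [] := by
        simp [List.getD_eq_getElem?_getD, List.getElem?_eq_none (by omega : bm.length ≤ i)]
      simp [hset]

theorem pvSet_drop_zero {α : Type} (l : List α) (k : Nat) (h : k < l.length) (x : α) :
    (l.drop k).set 0 x = x :: l.drop (k+1) := by
  rw [List.drop_eq_getElem_cons h, List.set_cons_zero]

-- filling every position of a list of the right length yields the map
theorem pvFill_prefix {α : Type} (f : Nat → α) :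
    ∀ (k : Nat) (ρ : List α), k ≤ ρ.length →
    (List.range k).foldl (fun r j => r.set j (f j)) ρ
      = (List.range k).map f ++ ρ.drop k := by
  intro k
  induction k with
  | zero => intro ρ _; simp
  | succ k ih =>
    intro ρ hk
    rw [List.range_succ, List.foldl_append, List.foldl_cons, List.foldl_nil,
      ih ρ (by omega), List.set_append_right _ _ (by simp)]
    simp only [List.length_map, List.length_range, Nat.sub_self]
    rw [pvSet_drop_zero ρ k (by omega)]
    simp

theorem pvFill_exact {α : Type} (f : Nat → α) (ρ : List α) :
    (List.range ρ.length).foldl (fun r j => r.set j (f j)) ρ = (List.range ρ.length).map f := by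
  rw [pvFill_prefix f ρ.length ρ le_rfl]; simp

-- outer fill: rows 0..k-1 of a matrix whose rows all have length M get replaced by g
theorem pvOuter_fill {M : Nat} (f : Nat → Nat → String) :
    ∀ (k : Nat) (bm : List (List String)), k ≤ bm.length → (∀ ρ ∈ bm, ρ.length = M) →
    (List.range k).foldl
      (fun b i => b.set i ((List.range M).foldl (fun ρ j => ρ.set j (f i j)) (b.getD i [])))
      bm
    = (List.range k).map (fun i => (List.range M).map (f i)) ++ bm.drop k := by
  intro k
  induction k with
  | zero => intro bm _ _; simp
  | succ k ih =>
    intro bm hk hrows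
    rw [List.range_succ, List.foldl_append, List.foldl_cons, List.foldl_nil, ih bm (by omega) hrows]
    have hmaplen : ((List.range k).map (fun i => (List.range M).map (f i))).length = k := by simp
    have hgd : (((List.range k).map (fun i => (List.range M).map (f i))) ++ bm.drop k).getD k []
        = bm[k]'(by omega) := by
      rw [List.getD_eq_getElem?_getD, List.getElem?_append_right (by omega)]
      simp [hmaplen, (by omega : k < bm.length)]
    have hrowlen : (bm[k]'(by omega)).length = M := hrows _ (List.getElem_mem _)
    rw [hgd]
    have hfill : (List.range M).foldl (fun ρ j => ρ.set j (f k j)) (bm[k]'(by omega))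
        = (List.range M).map (f k) := by
      calc (List.range M).foldl (fun ρ j => ρ.set j (f k j)) (bm[k]'(by omega))
          = (List.range (bm[k]'(by omega)).length).foldl (fun ρ j => ρ.set j (f k j))
              (bm[k]'(by omega)) := by rw [hrowlen]
        _ = (List.range (bm[k]'(by omega)).length).map (f k) := pvFill_exact _ _
        _ = (List.range M).map (f k) := by rw [hrowlen]
    rw [hfill, List.set_append_right _ _ (by simp)]
    simp only [List.length_map, List.length_range, Nat.sub_self]
    rw [pvSet_drop_zero bm k (by omega)]
    simp

-- split a fold over a pair of independent accumulators, nested version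
theorem pvFoldl_prod_nested {α β γ δ : Type} (f : α → γ → δ → α) (g : β → γ → δ → β)
    (outer : List γ) (inner : γ → List δ) :
    ∀ (a : α) (b : β),
    outer.foldl (fun st i => (inner i).foldl (fun st j => (f st.1 i j, g st.2 i j)) st) (a, b)
    = (outer.foldl (fun a i => (inner i).foldl (fun a j => f a i j) a) a,
       outer.foldl (fun b i => (inner i).foldl (fun b j => g b i j) b) b) := by
  induction outer with
  | nil => intro a b; rfl
  | cons i out ih =>
    intro a b
    simp only [List.foldl_cons]
    rw [PySem.List.foldl_prod_mk (f := fun a j => f a i j) (g := fun b j => g b i j)]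
    exact ih _ _

-- the A-side matrix-filling double fold builds exactly the nested-comprehension tiling
theorem pvBM_eq (g : Int → Int → String) (m : Nat) :
    (PySem.List.pyRange 0 (3*(m:Int)) 1).foldl (fun bm i =>
      (PySem.List.pyRange 0 (3*(m:Int)) 1).foldl (fun bm j =>
        PySem.List.pySetD bm i (PySem.List.pySetD (PySem.List.pyGetD bm i []) j (g i j))) bm)
      ((PySem.List.pyRange 0 (3*(m:Int)) 1).map (fun _ =>
        (PySem.List.pyRange 0 (3*(m:Int)) 1).map (fun _ => "#")))
    = (PySem.List.pyRange 0 (3*(m:Int)) 1).map (fun i =>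
        (PySem.List.pyRange 0 (3*(m:Int)) 1).map (fun j => g i j)) := by
  have hc : (3*(m:Int)) = ((3*m : Nat):Int) := by push_cast; ring
  have hR : PySem.List.pyRange 0 (3*(m:Int)) 1 = (List.range (3*m)).map (fun (k : Nat) => (k:Int)) := by
    rw [hc]; exact PySem.List.pyRange_zero_natCast (3*m)
  rw [hR]
  simp only [List.foldl_map, List.map_map, PySem.List.pySetD_natCast, PySem.List.pyGetD_natCast]
  refine Eq.trans (PySem.List.foldl_congr_mem _ _
      (fun bm (i : Nat) => bm.set i ((List.range (3*m)).foldl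
        (fun ρ j => ρ.set j (g (i:Int) (j:Int))) (bm.getD i [])))
      _ (fun acc x _ => pvInner_collapse (fun j => g (x:Int) (j:Int)) x (List.range (3*m)) acc)) ?_
  refine Eq.trans (pvOuter_fill (M := 3*m) (fun i j => g (i:Int) (j:Int)) (3*m) _
    (by simp) ?_) ?_
  · intro ρ hρ
    rcases List.mem_map.mp hρ with ⟨k, _, rfl⟩
    simp
  · simp [Function.comp_def]

-- one tiled row scan (3m cells, indices mod m) ends at the copy-2 column of the last match
theorem pvRow_eq (m : Nat) (q : Nat → Bool) (a : Int) (s0 : Option (Int × Int)) :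
    (List.range (3*m)).foldl (fun s j => if q (j % m) then some (a, (j:Int)) else s) s0
    = (List.range m).foldl (fun s c => if q c then some (a, ((m+(m+c):Nat) : Int)) else s) s0 := by
  have h3 : 3*m = m + (m + m) := by ring
  rw [h3, List.range_add, List.range_add, List.map_append, List.map_map,
    List.foldl_append, List.foldl_append, List.foldl_map, List.foldl_map]
  simp only [Function.comp_def]
  have e0 : (List.range m).foldl (fun s j => if q (j % m) then some (a,(j:Int)) else s) s0
      = (List.range m).foldl (fun s c => if q c then some (a, (c:Int)) else s) s0 :=
    PySem.List.foldl_congr_mem _ _ _ _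
      (fun acc x hx => by rw [Nat.mod_eq_of_lt (List.mem_range.mp hx)])
  have e1 : ∀ (y : Option (Int × Int)),
      (List.range m).foldl (fun s x => if q ((m+x) % m) then some (a, ((m+x:Nat):Int)) else s) y
      = (List.range m).foldl (fun s c => if q c then some (a, ((m+c:Nat):Int)) else s) y :=
    fun y => PySem.List.foldl_congr_mem _ _ _ _
      (fun acc x hx => by rw [Nat.add_mod_left, Nat.mod_eq_of_lt (List.mem_range.mp hx)])
  have e2 : ∀ (y : Option (Int × Int)),
      (List.range m).foldl
        (fun s x => if q ((m+(m+x)) % m) then some (a, ((m+(m+x):Nat):Int)) else s) y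
      = (List.range m).foldl (fun s c => if q c then some (a, ((m+(m+c):Nat):Int)) else s) y :=
    fun y => PySem.List.foldl_congr_mem _ _ _ _
      (fun acc x hx => by
        rw [Nat.add_mod_left, Nat.add_mod_left, Nat.mod_eq_of_lt (List.mem_range.mp hx)])
  rw [e0, e1, e2]
  rw [pvFoldl_if_absorb q (fun c => (a, ((m+c:Nat):Int))) (fun c => (a, ((m+(m+c):Nat):Int))),
    pvFoldl_if_absorb q (fun c => (a, (c:Int))) (fun c => (a, ((m+(m+c):Nat):Int)))]

-- the A-side S-scan over the 3m x 3m tiling equals the n×n last-match scan with (m+r, 2m+c)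
theorem pvS_eq (matrix : List (List String)) (m : Nat) :
    (PySem.List.pyRange 0 (3*(m:Int)) 1).foldl (fun s i =>
      (PySem.List.pyRange 0 (3*(m:Int)) 1).foldl (fun s j =>
        if PySem.List.pyGetD (PySem.List.pyGetD matrix (PySem.Int.mod i (m:Int)) [])
             (PySem.Int.mod j (m:Int)) "#" == "S" && (PySem.Int.floordiv i (m:Int) == 1)
        then some (i, j) else s) s)
      (none : Option (Int × Int))
    = (PySem.List.pyRange 0 (m:Int) 1).foldl (fun s r =>
        (PySem.List.pyRange 0 (m:Int) 1).foldl (fun s c =>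
          if PySem.List.pyGetD (PySem.List.pyGetD matrix r []) c "#" == "S"
          then some ((m:Int) + r, 2*(m:Int) + c) else s) s) none := by
  have hc : (3*(m:Int)) = ((3*m : Nat):Int) := by push_cast; ring
  have hR3 : PySem.List.pyRange 0 (3*(m:Int)) 1
      = (List.range (3*m)).map (fun (k : Nat) => (k:Int)) := by
    rw [hc]; exact PySem.List.pyRange_zero_natCast (3*m)
  have hR1 : PySem.List.pyRange 0 ((m:Int)) 1
      = (List.range m).map (fun (k : Nat) => (k:Int)) :=
    PySem.List.pyRange_zero_natCast m
  rw [hR3, hR1]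
  simp only [List.foldl_map, PySem.Int.mod_natCast, PySem.Int.floordiv_natCast]
  have hP0 : ∀ v : Nat, v ≠ 1 → (((v : Nat):Int) == 1) = false := by
    intro v hv
    rw [beq_eq_false_iff_ne]
    intro h
    exact hv (by exact_mod_cast h)
  have hinner : ∀ (acc : Option (Int × Int)), ∀ i ∈ List.range (3*m),
      (List.range (3*m)).foldl (fun s j =>
        if PySem.List.pyGetD (PySem.List.pyGetD matrix (((i % m : Nat)):Int) [])
             (((j % m : Nat)):Int) "#" == "S" && ((((i / m : Nat)):Int) == 1)
        then some ((i:Int), (j:Int)) else s) acc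
      = if (((i / m : Nat)):Int) == 1 then
          (List.range m).foldl (fun s c =>
            if PySem.List.pyGetD (PySem.List.pyGetD matrix (((i % m : Nat)):Int) [])
                 ((c : Nat):Int) "#" == "S"
            then some ((i:Int), ((m+(m+c) : Nat):Int)) else s) acc
        else acc := by
    intro acc i _
    by_cases hp : ((((i / m : Nat)):Int) == 1) = true
    · rw [if_pos hp,
        PySem.List.foldl_congr_mem _ _
          (fun s (j : Nat) =>
            if PySem.List.pyGetD (PySem.List.pyGetD matrix (((i % m : Nat)):Int) [])
                 (((j % m : Nat)):Int) "#" == "S" then some ((i:Int), (j:Int)) else s)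
          acc (fun a j _ => by rw [hp, Bool.and_true])]
      exact pvRow_eq m
        (fun x => PySem.List.pyGetD (PySem.List.pyGetD matrix (((i % m : Nat)):Int) [])
          ((x : Nat):Int) "#" == "S") (i:Int) acc
    · rw [if_neg hp,
        PySem.List.foldl_congr_mem _ _ (fun s (_ : Nat) => s) acc
          (fun a j _ => by rw [eq_false_of_ne_true hp, Bool.and_false, if_neg (by simp)]),
        PySem.List.foldl_ignore]
  rw [PySem.List.foldl_congr_mem _ _ _ none hinner]
  have h3 : 3*m = m + (m + m) := by ring
  rw [h3, List.range_add, List.range_add, List.map_append, List.map_map,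
    List.foldl_append, List.foldl_append, List.foldl_map, List.foldl_map]
  simp only [Function.comp_def]
  -- segment 0 (rows 0..m-1): i/m = 0, the test is never true
  rw [PySem.List.foldl_congr_mem _ _ (fun s (_ : Nat) => s) none
      (fun acc x hx => by
        rw [Nat.div_eq_of_lt (List.mem_range.mp hx), if_neg (by rw [hP0 0 (by decide)]; simp)]),
    PySem.List.foldl_ignore]
  -- segment 2 (rows 2m..3m-1): i/m = 2, the test is never true
  rw [PySem.List.foldl_congr_mem _ _ (fun s (_ : Nat) => s) _
      (fun acc x hx => by
        have hx' := List.mem_range.mp hx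
        have hd : (m + (m + x)) / m = 2 := by
          have h : m + (m + x) = x + m + m := by ring
          rw [h, Nat.add_div_right _ (by omega), Nat.add_div_right _ (by omega),
            Nat.div_eq_of_lt hx']
        rw [hd, if_neg (by rw [hP0 2 (by decide)]; simp)]),
    PySem.List.foldl_ignore]
  -- segment 1 (rows m..2m-1): i/m = 1, i%m = r; compare with the n×n scan
  refine PySem.List.foldl_congr_mem _ _ _ none (fun acc r hr => ?_)
  have hr' := List.mem_range.mp hr
  have hd : (m + r) / m = 1 := by
    rw [Nat.add_comm, Nat.add_div_right _ (by omega), Nat.div_eq_of_lt hr']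
  have hmod : (m + r) % m = r := by
    rw [Nat.add_mod_left, Nat.mod_eq_of_lt hr']
  rw [hd, hmod, if_pos (by simp)]
  refine PySem.List.foldl_congr_mem _ _ _ acc (fun a c _ => ?_)
  have h1 : ((m + r : Nat):Int) = (m:Int) + (r:Int) := by push_cast; ring
  have h2 : ((m + (m + c) : Nat):Int) = 2*(m:Int) + (c:Int) := by push_cast; ring
  rw [h1, h2]

-- ===== B-side lemmas =====

-- reversed range as a map
theorem pvReverse_range (n : Nat) :
    (List.range n).reverse = (List.range n).map (fun k => n - 1 - k) := by
  apply List.ext_getElem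
  · simp
  · intro k h1 h2
    simp only [List.length_reverse, List.length_range] at h1
    simp [List.getElem_reverse, List.getElem_range]

-- reading positions 0..m-1 with a default is taking the first m elements
theorem pvMapGetD_take {α : Type} (l : List α) (m : Nat) (d : α) (h : m ≤ l.length) :
    (List.range m).map (fun c => l.getD c d) = l.take m := by
  apply List.ext_getElem
  · simp [h]
  · intro k h1 h2
    simp only [List.length_map, List.length_range] at h1
    simp [List.getD_eq_getElem?_getD, List.getElem?_eq_getElem (by omega : k < l.length)]

theorem pvGetD_take {α : Type} (l : List α) (m c : Nat) (d : α) (hc : c < m)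
    (_h : m ≤ l.length) : (l.take m).getD c d = l.getD c d := by
  rw [List.getD_eq_getElem?_getD, List.getD_eq_getElem?_getD, List.getElem?_take_of_lt hc]

-- a map over range 3m that only depends on the index mod m is a triple repetition
theorem pvTriMap {α : Type} (f : Nat → α) (m : Nat) :
    (List.range (3*m)).map (fun k => f (k % m))
    = (List.range m).map f ++ (List.range m).map f ++ (List.range m).map f := by
  have h3 : 3*m = m + (m + m) := by ring
  rw [h3, List.range_add, List.range_add]
  simp only [List.map_append, List.map_map]
  have e1 : (List.range m).map (fun k => f (k % m)) = (List.range m).map f :=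
    List.map_congr_left (fun x hx => by rw [Nat.mod_eq_of_lt (List.mem_range.mp hx)])
  have e2 : (List.range m).map ((fun k => f (k % m)) ∘ fun x => m + x) = (List.range m).map f :=
    List.map_congr_left (fun x hx => by
      simp only [Function.comp_apply]
      rw [Nat.add_mod_left, Nat.mod_eq_of_lt (List.mem_range.mp hx)])
  have e3 : (List.range m).map ((fun k => f (k % m)) ∘ (fun x => m + x) ∘ fun x => m + x)
      = (List.range m).map f :=
    List.map_congr_left (fun x hx => by
      simp only [Function.comp_apply]
      rw [Nat.add_mod_left, Nat.add_mod_left, Nat.mod_eq_of_lt (List.mem_range.mp hx)])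
  rw [e1, e2, e3, List.append_assoc]

-- a forward last-match scan over the positions of p stops at the LAST occurrence,
-- whose index is written the way B computes it: len-1 - p[::-1].index(t)
theorem pvScanLast {β : Type} (t d : String) (V : Nat → β) :
    ∀ (p : List String) (s : Option β),
    (List.range p.length).foldl (fun s c => if p.getD c d == t then some (V c) else s) s
    = if t ∈ p then some (V (p.length - 1 - (PySem.List.index? p.reverse t).getD 0)) else s := by
  intro p
  induction p using List.reverseRecOn with
  | nil => intro s; simp
  | append_singleton p x ih =>
    intro s
    rw [List.length_append, List.length_singleton, List.range_succ, List.foldl_append,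
      List.foldl_cons, List.foldl_nil]
    have hcong : (List.range p.length).foldl
        (fun s c => if (p ++ [x]).getD c d == t then some (V c) else s) s
        = (List.range p.length).foldl (fun s c => if p.getD c d == t then some (V c) else s) s :=
      PySem.List.foldl_congr_mem _ _ _ _ (fun acc c hc => by
        rw [List.getD_eq_getElem?_getD, List.getD_eq_getElem?_getD,
          List.getElem?_append_left (by simpa using List.mem_range.mp hc)])
    have hlast : (p ++ [x]).getD p.length d = x := by
      rw [List.getD_eq_getElem?_getD, List.getElem?_append_right le_rfl]
      simp
    rw [hcong, ih, hlast, List.reverse_append, List.reverse_singleton, List.singleton_append]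
    by_cases hx : x = t
    · subst hx
      rw [if_pos (beq_self_eq_true x), PySem.List.index?_cons_self]
      simp
    · have hbx : (x == t) = false := beq_eq_false_iff_ne.mpr hx
      rw [hbx, if_neg (by simp), PySem.List.index?_cons_of_ne p.reverse hx]
      by_cases hmem : t ∈ p
      · have hsome : (PySem.List.index? p.reverse t).isSome = true :=
          (PySem.List.index?_isSome_iff _ _).mpr (List.mem_reverse.mpr hmem)
        obtain ⟨i, hi⟩ := Option.isSome_iff_exists.mp hsome
        rw [hi]
        have hm1 : t ∈ p ++ [x] := List.mem_append_left _ hmem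
        rw [if_pos hmem, if_pos hm1]
        simp only [Option.map_some, Option.getD_some]
        have harg : p.length + 1 - 1 - (i + 1) = p.length - 1 - i := by omega
        rw [harg]
      · have hm1 : ¬ t ∈ p ++ [x] := by
          intro h
          rcases List.mem_append.mp h with h | h
          · exact hmem h
          · exact hx (List.mem_singleton.mp h).symm
        rw [if_neg hmem, if_neg hm1]

-- a forward fold keeping the last match equals find? over the reversed list
theorem pvLastMatch {γ β : Type} (P : γ → Prop) [DecidablePred P] (V : γ → β) :
    ∀ (l : List γ) (s : Option β),
    l.foldl (fun s x => if P x then some (V x) else s) s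
    = (l.reverse.find? (fun x => decide (P x))).elim s (fun x => some (V x)) := by
  intro l
  induction l using List.reverseRecOn with
  | nil => intro s; simp
  | append_singleton l x ih =>
    intro s
    rw [List.foldl_append, List.foldl_cons, List.foldl_nil, List.reverse_append,
      List.reverse_singleton, List.singleton_append, List.find?_cons]
    by_cases hx : P x
    · simp [hx]
    · simp only [hx, decide_false]
      exact ih s

-- B's reversed break-loop is find? over its row list
theorem pvFind_eq (n : Int) (matrix : List (List String)) :
    ∀ (l : List Int),
    migongFind n matrix l
    = (l.find? (fun r => decide ("S" ∈ PySem.List.slice (PySem.List.pyGetD matrix r []) none (some n)))).elim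
        none (fun r => some (n + r, 3*n - 1 -
          (((PySem.List.index? (PySem.List.slice (PySem.List.pyGetD matrix r []) none (some n)).reverse "S").getD 0 : Nat) : Int))) := by
  intro l
  induction l with
  | nil => rfl
  | cons r rs ih =>
    rw [List.find?_cons]
    by_cases hr : "S" ∈ PySem.List.slice (PySem.List.pyGetD matrix r []) none (some n)
    · simp [migongFind, hr]
    · simp only [hr, decide_false]
      rw [show migongFind n matrix (r :: rs) = migongFind n matrix rs by
        simp [migongFind, hr]]
      exact ih

-- find? respects pointwise-equal predicates on the list's members
theorem pvFind?_congr {α : Type} (p q : α → Bool) :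
    ∀ (l : List α), (∀ x ∈ l, p x = q x) → l.find? p = l.find? q := by
  intro l
  induction l with
  | nil => intro _; rfl
  | cons x xs ih =>
    intro h
    rw [List.find?_cons, List.find?_cons, h x List.mem_cons_self]
    by_cases hq : q x = true
    · rw [hq]
    · rw [eq_false_of_ne_true hq]
      exact ih (fun y hy => h y (List.mem_cons_of_mem _ hy))

-- the tiled big matrix built by A equals B's slice-and-repeat construction
theorem pvBig_eq (matrix : List (List String)) (m : Nat)
    (hlen : m ≤ matrix.length)
    (hrows : ∀ row ∈ matrix.take m, m ≤ row.length) :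
    (PySem.List.pyRange 0 (3*(m:Int)) 1).map (fun i =>
      (PySem.List.pyRange 0 (3*(m:Int)) 1).map (fun j =>
        PySem.List.pyGetD (PySem.List.pyGetD matrix (PySem.Int.mod i (m:Int)) [])
          (PySem.Int.mod j (m:Int)) "#"))
    = (let tile := (PySem.List.slice matrix none (some (m:Int))).map (fun row =>
        let p := PySem.List.slice row none (some (m:Int))
        p ++ p ++ p)
       tile ++ tile ++ tile) := by
  have hc : (3*(m:Int)) = ((3*m : Nat):Int) := by push_cast; ring
  have hR : PySem.List.pyRange 0 (3*(m:Int)) 1 = (List.range (3*m)).map (fun (k : Nat) => (k:Int)) := by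
    rw [hc]; exact PySem.List.pyRange_zero_natCast (3*m)
  rw [hR]
  simp only [List.map_map, Function.comp_def, PySem.Int.mod_natCast, PySem.List.pyGetD_natCast,
    PySem.List.slice_to_natCast]
  -- inner maps: each row i depends only on i % m
  rw [pvTriMap (f := fun r => (List.range (3*m)).map
      (fun j => (matrix.getD r []).getD (j % m) "#")) m]
  have hrow : ∀ r ∈ List.range m,
      (List.range (3*m)).map (fun j => (matrix.getD r []).getD (j % m) "#")
      = (let p := (matrix.getD r []).take m
         p ++ p ++ p) := by
    intro r hr
    have hr' := List.mem_range.mp hr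
    have hrm : r < matrix.length := by omega
    have hl : m ≤ (matrix.getD r []).length := by
      rw [List.getD_eq_getElem?_getD, List.getElem?_eq_getElem hrm]
      refine hrows _ ?_
      have h' : r < (matrix.take m).length := by
        rw [List.length_take]; omega
      have hmem' := List.getElem_mem h'
      rwa [List.getElem_take] at hmem'
    rw [pvTriMap (f := fun c => (matrix.getD r []).getD c "#") m,
      pvMapGetD_take _ _ _ hl]
  rw [List.map_congr_left hrow]
  have hmat : (List.range m).map (fun r => matrix.getD r []) = matrix.take m :=
    pvMapGetD_take matrix m [] hlen
  have hcomp : (List.range m).map (fun r =>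
      (let p := (matrix.getD r []).take m
       p ++ p ++ p))
      = (matrix.take m).map (fun row => (let p := row.take m; p ++ p ++ p)) := by
    rw [← hmat, List.map_map]
    rfl
  rw [hcomp]

-- the n×n last-match scan equals B's reversed break-search
theorem pvScan_eq (matrix : List (List String)) (m : Nat) (hm : 1 ≤ m)
    (hlen : m ≤ matrix.length)
    (hrows : ∀ row ∈ matrix.take m, m ≤ row.length) :
    (PySem.List.pyRange 0 (m:Int) 1).foldl (fun s r =>
        (PySem.List.pyRange 0 (m:Int) 1).foldl (fun s c =>
          if PySem.List.pyGetD (PySem.List.pyGetD matrix r []) c "#" == "S"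
          then some ((m:Int) + r, 2*(m:Int) + c) else s) s) none
    = migongFind (m:Int) matrix (PySem.List.pyRange ((m:Int) - 1) (-1) (-1)) := by
  have hR1 : PySem.List.pyRange 0 ((m:Int)) 1
      = (List.range m).map (fun (k : Nat) => (k:Int)) :=
    PySem.List.pyRange_zero_natCast m
  rw [hR1]
  simp only [List.foldl_map, PySem.List.pyGetD_natCast]
  -- facts about each row r < m
  have hrowlen : ∀ r, r < m → m ≤ (matrix.getD r []).length := by
    intro r hr
    have hrm : r < matrix.length := by omega
    rw [List.getD_eq_getElem?_getD, List.getElem?_eq_getElem hrm]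
    refine hrows _ ?_
    have h' : r < (matrix.take m).length := by
      rw [List.length_take]; omega
    have hmem' := List.getElem_mem h'
    rwa [List.getElem_take] at hmem'
  have hplen : ∀ r, r < m → ((matrix.getD r []).take m).length = m := by
    intro r hr
    rw [List.length_take]
    exact Nat.min_eq_left (hrowlen r hr)
  -- collapse the inner fold to a last-occurrence test on row r
  have hinner : ∀ (acc : Option (Int × Int)), ∀ r ∈ List.range m,
      (List.range m).foldl (fun s c =>
        if (matrix.getD r []).getD c "#" == "S"
        then some ((m:Int) + (r:Int), 2*(m:Int) + (c:Int)) else s) acc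
      = if "S" ∈ (matrix.getD r []).take m then
          some ((m:Int) + (r:Int), 2*(m:Int) +
            ((m - 1 - (PySem.List.index? ((matrix.getD r []).take m).reverse "S").getD 0 : Nat) : Int))
        else acc := by
    intro acc r hr
    have hr' := List.mem_range.mp hr
    have hcong : (List.range m).foldl (fun s c =>
        if (matrix.getD r []).getD c "#" == "S"
        then some ((m:Int) + (r:Int), 2*(m:Int) + (c:Int)) else s) acc
        = (List.range m).foldl (fun s c =>
          if ((matrix.getD r []).take m).getD c "#" == "S"
          then some ((m:Int) + (r:Int), 2*(m:Int) + (c:Int)) else s) acc :=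
      PySem.List.foldl_congr_mem _ _ _ _ (fun a c hc => by
        rw [pvGetD_take _ _ _ _ (List.mem_range.mp hc) (hrowlen r hr')])
    rw [hcong, show List.range m = List.range ((matrix.getD r []).take m).length by
        rw [hplen r hr'],
      pvScanLast "S" "#" (fun c => ((m:Int) + (r:Int), 2*(m:Int) + (c:Int))), hplen r hr']
  rw [PySem.List.foldl_congr_mem _ _ _ none hinner,
    pvLastMatch (fun r => "S" ∈ (matrix.getD r []).take m)
      (fun r => ((m:Int) + (r:Int), 2*(m:Int) +
        ((m - 1 - (PySem.List.index? ((matrix.getD r []).take m).reverse "S").getD 0 : Nat) : Int)))]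
  -- B side: unfold the break-loop to find? over the countdown list
  rw [pvFind_eq]
  have hlist : PySem.List.pyRange ((m:Int) - 1) (-1) (-1)
      = ((List.range m).reverse).map (fun (k : Nat) => (k:Int)) := by
    rw [PySem.List.pyRange_neg_one, pvReverse_range, List.map_map]
    have hn : ((m:Int) - 1 - (-1)).toNat = m := by omega
    rw [hn]
    exact List.map_congr_left (fun k hk => by
      have hk' := List.mem_range.mp hk
      simp only [Function.comp_def]
      omega)
  rw [hlist, List.find?_map]
  have hpred : ((List.range m).reverse).find? (fun k =>
        decide ("S" ∈ PySem.List.slice (PySem.List.pyGetD matrix ((k:Nat):Int) []) none (some (m:Int))))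
      = ((List.range m).reverse).find? (fun r => decide ("S" ∈ (matrix.getD r []).take m)) :=
    pvFind?_congr _ _ _ (fun k hk => by
      simp [PySem.List.slice_to_natCast])
  rw [show (fun (x : Int) => decide ("S" ∈ PySem.List.slice (PySem.List.pyGetD matrix x []) none (some (m:Int)))) ∘ (fun (k : Nat) => (k:Int))
      = (fun k => decide ("S" ∈ PySem.List.slice (PySem.List.pyGetD matrix ((k:Nat):Int) []) none (some (m:Int)))) from rfl,
    hpred]
  -- compare the two elim forms
  cases hF : ((List.range m).reverse).find? (fun r => decide ("S" ∈ (matrix.getD r []).take m)) with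
  | none => rfl
  | some r =>
    have hrm : r < m := List.mem_range.mp (List.mem_reverse.mp (List.mem_of_find?_eq_some hF))
    have hPr := List.find?_some hF
    simp only [decide_eq_true_eq] at hPr
    have hS : "S" ∈ (matrix.getD r []).take m := hPr
    simp only [Option.elim_some, Option.map_some]
    have hslice : PySem.List.slice (PySem.List.pyGetD matrix ((r:Nat):Int) []) none (some (m:Int))
        = (matrix.getD r []).take m := by
      simp [PySem.List.slice_to_natCast]
    rw [hslice]
    -- the index of "S" in the reversed row prefix is < m
    obtain ⟨i, hi⟩ := Option.isSome_iff_exists.mp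
      ((PySem.List.index?_isSome_iff _ _).mpr (List.mem_reverse.mpr hS))
    have hik := PySem.List.getElem_of_index?_eq_some hi
    obtain ⟨hilt, _⟩ := hik
    rw [List.length_reverse, hplen r hrm] at hilt
    rw [hi]
    simp only [Option.getD_some]
    have harith : 2*(m:Int) + ((m - 1 - i : Nat) : Int) = 3*(m:Int) - 1 - (i : Int) := by
      omega
    rw [harith]

-- the two ports agree on every admitted input
theorem pvMigong_eq (n : Int) (matrix : List (List String))
    (h1 : 1 ≤ n) (h2 : n ≤ matrix.length)
    (h3 : ∀ row ∈ matrix.take n.toNat, n ≤ (row.length : Int)) :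
    migong n matrix = migong_alt n matrix := by
  obtain ⟨m, rfl⟩ : ∃ m : Nat, n = (m:Int) := ⟨n.toNat, by omega⟩
  have hm : 1 ≤ m := by exact_mod_cast h1
  have hlen : m ≤ matrix.length := by exact_mod_cast h2
  have hrows : ∀ row ∈ matrix.take m, m ≤ row.length := by
    intro row hrow
    have := h3 row (by simpa using hrow)
    exact_mod_cast this
  simp only [migong, migong_alt]
  rw [pvFoldl_prod_nested
    (f := fun bm (i j : Int) => PySem.List.pySetD bm i
      (PySem.List.pySetD (PySem.List.pyGetD bm i []) j
        (PySem.List.pyGetD (PySem.List.pyGetD matrix (PySem.Int.mod i (m:Int)) [])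
          (PySem.Int.mod j (m:Int)) "#")))
    (g := fun s (i j : Int) =>
      if PySem.List.pyGetD (PySem.List.pyGetD matrix (PySem.Int.mod i (m:Int)) [])
           (PySem.Int.mod j (m:Int)) "#" == "S" && (PySem.Int.floordiv i (m:Int) == 1)
      then some (i, j) else s)]
  rw [pvBM_eq (fun i j =>
    PySem.List.pyGetD (PySem.List.pyGetD matrix (PySem.Int.mod i (m:Int)) [])
      (PySem.Int.mod j (m:Int)) "#") m]
  rw [pvS_eq matrix m]
  rw [pvBig_eq matrix m hlen hrows, pvScan_eq matrix m hm hlen hrows]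

-- ===== VERDICT (by name: the statement is the Claim_ definition above) =====
theorem migong_spec : Claim_equal_migong := by
  intro n matrix _ hpre
  unfold Spec_migong
  exact pvMigong_eq n matrix hpre.1 hpre.2.1 hpre.2.2.1
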